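-- pv_equiv track=rewrite | github.com/pypi-data/pypi-mirror-346 | packages/aor/aor-0.2.2.tar.gz/aor-0.2.2/src/aor/templates/utils/validators/dependency.py | _check_version_compatibility
-- ===== SOURCE A (Python) =====
-- from typing import List, Dict, Any, Set, Optional
--
-- def _check_version_compatibility(versions: List[Dict[str, Any]]) -> bool:
--     """Check if a list of version specifications are compatible."""
--     # This is a simplified check
--     # In reality, you'd want to use a proper version constraint solver
--     operators = set()
--     version_strs = set()
--
--     for v in versions:
--         if v["version"]["operator"]:
--             operators.add(v["version"]["operator"])
--             version_strs.add(v["version"]["version"])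
--
--     # If all have the same operator and version, they're compatible
--     if len(operators) <= 1 and len(version_strs) <= 1:
--         return True
--
--     # For now, we'll say they're incompatible if they're different
--     return False
-- ===== SOURCE B (Python) =====
-- def _check_version_compatibility(versions):
--     """Check if a list of version specifications are compatible."""
--     # Single pass: remember the first (operator, version) with a truthy
--     # operator; bail out as soon as a later one differs.
--     seen = None
--     for v in versions:
--         spec = v["version"]
--         op = spec["operator"]
--         if not op:
--             continue
--         if seen is None:
--             seen = (op, spec["version"])
--         elif op != seen[0] or spec["version"] != seen[1]:
--             return False
--     return True
-- ===== Notes on version B (the rewrite author's own statement) =====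
-- stated objective: simpler
-- what changed: Replaces the two accumulated sets plus a final cardinality test by a single short-circuiting pass that remembers the first truthy (operator, version) pair and returns False at the first mismatch.
import Mathlib
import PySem

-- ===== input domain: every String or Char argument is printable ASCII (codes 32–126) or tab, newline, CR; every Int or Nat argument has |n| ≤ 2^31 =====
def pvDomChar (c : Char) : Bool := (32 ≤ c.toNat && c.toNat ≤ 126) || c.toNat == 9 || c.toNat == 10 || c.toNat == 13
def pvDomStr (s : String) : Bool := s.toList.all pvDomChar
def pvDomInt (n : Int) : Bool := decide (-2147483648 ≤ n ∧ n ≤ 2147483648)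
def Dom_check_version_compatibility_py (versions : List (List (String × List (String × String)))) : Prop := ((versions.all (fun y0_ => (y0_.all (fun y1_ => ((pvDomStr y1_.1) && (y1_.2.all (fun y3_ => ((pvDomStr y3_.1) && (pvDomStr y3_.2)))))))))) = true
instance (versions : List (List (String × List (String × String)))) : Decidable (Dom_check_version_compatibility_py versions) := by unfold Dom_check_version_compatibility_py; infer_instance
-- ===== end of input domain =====

-- B replaces A's two accumulated sets + final cardinality test by one short-circuiting
-- pass remembering the first truthy (operator, version) pair (objective: simpler).


-- ===== PORT A =====
-- shared helpers for the two key lookups v["version"]["operator"] / v["version"]["version"]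
-- (total via getD; faithful on Pre_, which rules KeyError out)
def pvInner (v : List (String × List (String × String))) : List (String × String) :=
  PySem.Dict.getD (PySem.Dict.mk v) "version" []

def pvOp (v : List (String × List (String × String))) : String :=
  PySem.Dict.getD (PySem.Dict.mk (pvInner v)) "operator" ""

def pvVer (v : List (String × List (String × String))) : String :=
  PySem.Dict.getD (PySem.Dict.mk (pvInner v)) "version" ""

-- one iteration of A's loop: add the truthy operator and its version to the two sets
def pvStepA (st : PySem.Set String × PySem.Set String) (v : List (String × List (String × String))) :
    PySem.Set String × PySem.Set String :=
  if pvOp v ≠ "" then (PySem.Set.add st.1 (pvOp v), PySem.Set.add st.2 (pvVer v)) else st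

def check_version_compatibility_py (versions : List (List (String × List (String × String)))) : Bool :=
  let st := versions.foldl pvStepA (PySem.Set.empty, PySem.Set.empty)
  if PySem.Set.len st.1 ≤ 1 ∧ PySem.Set.len st.2 ≤ 1 then true else false

-- ===== PORT B =====
-- B's loop: `seen` is the first truthy (operator, version) pair, or none
def pvGoB : List (List (String × List (String × String))) → Option (String × String) → Bool
  | [], _ => true
  | v :: rest, seen =>
    if pvOp v = "" then pvGoB rest seen
    else
      match seen with
      | none => pvGoB rest (some (pvOp v, pvVer v))
      | some (o, w) => if pvOp v ≠ o ∨ pvVer v ≠ w then false else pvGoB rest seen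

def check_version_compatibility_py_alt (versions : List (List (String × List (String × String)))) : Bool :=
  pvGoB versions none

-- ===== PRECONDITION & SPEC =====
-- Pre_ excludes exactly the inputs where Python A raises KeyError: an entry without a
-- "version" key, an inner dict without an "operator" key, or (when the operator is
-- truthy) without a "version" key.
def Pre_check_version_compatibility_py (versions : List (List (String × List (String × String)))) : Prop :=
  (versions.all (fun v =>
    match PySem.Dict.get? (PySem.Dict.mk v) "version" with
    | none => false
    | some inner =>
      match PySem.Dict.get? (PySem.Dict.mk inner) "operator" with
      | none => false
      | some op => op == "" || (PySem.Dict.get? (PySem.Dict.mk inner) "version").isSome)) = true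
instance (versions : List (List (String × List (String × String)))) : Decidable (Pre_check_version_compatibility_py versions) := by unfold Pre_check_version_compatibility_py; infer_instance

def pvWitness_check_version_compatibility_py : (List (List (String × List (String × String)))) :=
  ([[("version", [("operator", "=="), ("version", "1.0")])],
    [("version", [("operator", "=="), ("version", "1.0")])]])

def Spec_check_version_compatibility_py (versions : List (List (String × List (String × String)))) (out : Bool) : Prop := out = check_version_compatibility_py_alt versions
instance (versions : List (List (String × List (String × String)))) (out : Bool) : Decidable (Spec_check_version_compatibility_py versions out) := by unfold Spec_check_version_compatibility_py; infer_instance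

-- ===== CLAIM (what is proved, stated in full; the proofs are below) =====
def Claim_equal_check_version_compatibility_py : Prop := ∀ (versions : List (List (String × List (String × String)))), Dom_check_version_compatibility_py versions → Pre_check_version_compatibility_py versions → Spec_check_version_compatibility_py versions (check_version_compatibility_py versions)

-- ===== LEMMAS AND PROOFS =====

lemma set_add_len_ge {s : PySem.Set String} {x : String} : s.length ≤ (PySem.Set.add s x).length := by
  simp only [PySem.Set.add]
  split <;> simp

lemma foldA_mono : ∀ (l : List (List (String × List (String × String))))
    (S T : PySem.Set String),
    S.length ≤ (l.foldl pvStepA (S, T)).1.length ∧ T.length ≤ (l.foldl pvStepA (S, T)).2.length := by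
  intro l
  induction l with
  | nil => intro S T; simp
  | cons v rest ih =>
    intro S T
    simp only [List.foldl_cons, pvStepA]
    by_cases h : pvOp v = ""
    · simp only [h, ne_eq, not_true_eq_false, if_false]
      exact ih S T
    · simp only [h, ne_eq, not_false_eq_true, if_true]
      obtain ⟨h1, h2⟩ := ih (PySem.Set.add S (pvOp v)) (PySem.Set.add T (pvVer v))
      exact ⟨le_trans set_add_len_ge h1, le_trans set_add_len_ge h2⟩

lemma set_add_self (o : String) : PySem.Set.add [o] o = [o] := by
  simp [PySem.Set.add, PySem.Set.contains]

lemma set_add_ne {o x : String} (h : x ≠ o) : PySem.Set.add [o] x = [o, x] := by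
  simp [PySem.Set.add, PySem.Set.contains, h]

lemma goB_some : ∀ (l : List (List (String × List (String × String)))) (o w : String),
    pvGoB l (some (o, w)) =
      decide ((l.foldl pvStepA ([o], [w])).1.length ≤ 1 ∧ (l.foldl pvStepA ([o], [w])).2.length ≤ 1) := by
  intro l
  induction l with
  | nil => intro o w; simp [pvGoB]
  | cons v rest ih =>
    intro o w
    simp only [List.foldl_cons, pvGoB]
    by_cases h0 : pvOp v = ""
    · have hs : pvStepA ([o], [w]) v = ([o], [w]) := by simp [pvStepA, h0]
      simp only [h0, if_true, hs]
      exact ih o w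
    · have hs : pvStepA ([o], [w]) v = (PySem.Set.add [o] (pvOp v), PySem.Set.add [w] (pvVer v)) := by
        simp [pvStepA, h0]
      simp only [h0, if_false, hs]
      by_cases hoo : pvOp v = o
      · by_cases hww : pvVer v = w
        · rw [if_neg (by simp [hoo, hww]), hoo, hww, set_add_self, set_add_self]
          exact ih o w
        · rw [if_pos (Or.inr hww), set_add_ne hww]
          obtain ⟨_, h2⟩ := foldA_mono rest (PySem.Set.add [o] (pvOp v)) [w, pvVer v]
          simp only [List.length_cons] at h2
          symm; simp only [decide_eq_false_iff_not, not_and, not_le]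
          omega
      · rw [if_pos (Or.inl hoo), set_add_ne hoo]
        obtain ⟨h1, _⟩ := foldA_mono rest [o, pvOp v] (PySem.Set.add [w] (pvVer v))
        simp only [List.length_cons] at h1
        symm; simp only [decide_eq_false_iff_not, not_and, not_le]
        omega

lemma goB_none : ∀ (l : List (List (String × List (String × String)))),
    pvGoB l none =
      decide ((l.foldl pvStepA ([], [])).1.length ≤ 1 ∧ (l.foldl pvStepA ([], [])).2.length ≤ 1) := by
  intro l
  induction l with
  | nil => simp [pvGoB]
  | cons v rest ih =>
    simp only [List.foldl_cons, pvGoB]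
    by_cases h0 : pvOp v = ""
    · have hs : pvStepA ([], []) v = ([], []) := by simp [pvStepA, h0]
      simp only [h0, if_true, hs]
      exact ih
    · have hs : pvStepA ([], []) v = ([pvOp v], [pvVer v]) := by
        simp [pvStepA, h0, PySem.Set.add, PySem.Set.contains]
      simp only [h0, if_false, hs]
      exact goB_some rest (pvOp v) (pvVer v)

-- ===== VERDICT (by name: the statement is the Claim_ definition above) =====
theorem check_version_compatibility_py_spec : Claim_equal_check_version_compatibility_py := by
  intro versions _ _
  unfold Spec_check_version_compatibility_py check_version_compatibility_py check_version_compatibility_py_alt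
  rw [goB_none]
  simp [PySem.Set.len, PySem.Set.empty]
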